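-- pv_equiv track=rewrite | github.com/Mar-Two/module10 | ex3/functools_artifacts.py | spell_reducer
-- ===== SOURCE A (Python) =====
-- from operator import add, mul
-- from functools import reduce, partial, lru_cache, singledispatch
-- from collections.abc import Callable
--
-- def spell_reducer(spells: list[int], operation: str) -> int:
--     if (not isinstance(spells, list) or
--             not all(isinstance(x, int) for x in spells)):
--         raise ValueError("Error: spells must be a list of int")
--     if not spells:
--         return 0
--     operations: dict[str, Callable[[int, int], int]] = {
--         "add": add,
--         "multiply": mul,
--         "max": max,
--         "min": min,
--     }
--     if operation not in operations:
--         raise ValueError("Error: Unknown operation")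
--     return reduce(operations[operation], spells)
-- ===== SOURCE B (Python) =====
-- def spell_reducer(spells: list[int], operation: str) -> int:
--     if (not isinstance(spells, list) or
--             not all(isinstance(x, int) for x in spells)):
--         raise ValueError("Error: spells must be a list of int")
--     if not spells:
--         return 0
--     if operation == "add":
--         comb = lambda a, b: a + b
--     elif operation == "multiply":
--         comb = lambda a, b: a * b
--     elif operation == "max":
--         comb = lambda a, b: a if a >= b else b
--     elif operation == "min":
--         comb = lambda a, b: a if a <= b else b
--     else:
--         raise ValueError("Error: Unknown operation")
--
--     def tree(xs):
--         # divide-and-conquer pairwise reduction; correct because all four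
--         # operations are associative, so any bracketing gives the fold's value
--         if len(xs) == 1:
--             return xs[0]
--         mid = len(xs) // 2
--         return comb(tree(xs[:mid]), tree(xs[mid:]))
--
--     return tree(spells)
-- ===== Notes on version B (the rewrite author's own statement) =====
-- stated objective: alternative
-- what changed: Replaces the operator-dict plus left-to-right functools.reduce with a recursive divide-and-conquer tree reduction (split at the midpoint, combine the two halves), correct because all four operations are associative.
import Mathlib
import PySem

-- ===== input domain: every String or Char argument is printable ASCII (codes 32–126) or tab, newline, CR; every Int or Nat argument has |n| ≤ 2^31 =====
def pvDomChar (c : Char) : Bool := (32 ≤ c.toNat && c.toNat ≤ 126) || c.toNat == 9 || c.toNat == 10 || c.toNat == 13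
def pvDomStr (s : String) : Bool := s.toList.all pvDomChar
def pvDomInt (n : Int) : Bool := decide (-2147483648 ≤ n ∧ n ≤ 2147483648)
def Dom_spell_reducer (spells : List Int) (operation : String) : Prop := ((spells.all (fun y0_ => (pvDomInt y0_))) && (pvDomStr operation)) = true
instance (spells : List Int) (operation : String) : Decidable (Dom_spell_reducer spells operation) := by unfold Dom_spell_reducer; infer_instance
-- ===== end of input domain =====

-- B replaces the operator-dict + left-to-right reduce with a recursive midpoint
-- divide-and-conquer tree reduction (objective: alternative). Return-value equivalence only.

-- ===== PORT A =====
-- A: if not spells: return 0; dict of binary ops; reduce(op, spells) = fold op over tail with head as init.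
-- On an unknown operation with nonempty spells A raises ValueError; excluded by Pre_ (the port returns 0 there).
def spell_reducer (spells : List Int) (operation : String) : Int :=
  match spells with
  | [] => 0
  | h :: t =>
    if operation == "add" then t.foldl (· + ·) h
    else if operation == "multiply" then t.foldl (· * ·) h
    else if operation == "max" then t.foldl max h
    else if operation == "min" then t.foldl min h
    else 0  -- ValueError "Error: Unknown operation" (outside Pre_)

-- ===== PORT B =====
-- B's comb: the selected binary operation (a if a >= b else b, etc.)
def pvComb (operation : String) (a b : Int) : Int :=
  if operation == "add" then a + b
  else if operation == "multiply" then a * b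
  else if operation == "max" then (if a ≥ b then a else b)
  else (if a ≤ b then a else b)

-- B's tree: split at mid = len // 2, combine the two halves (singleton is the base case).
def pvTree (operation : String) : List Int → Int
  | [] => 0  -- unreachable: tree is only called on nonempty lists
  | [x] => x
  | x :: y :: rest =>
      pvComb operation
        (pvTree operation ((x :: y :: rest).take ((x :: y :: rest).length / 2)))
        (pvTree operation ((x :: y :: rest).drop ((x :: y :: rest).length / 2)))
termination_by xs => xs.length
decreasing_by all_goals (simp [List.length_take, List.length_drop]; omega)

-- B: empty → 0; select comb by operation (unknown op raises ValueError, outside Pre_); tree-reduce.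
def spell_reducer_alt (spells : List Int) (operation : String) : Int :=
  if spells = [] then 0
  else if operation == "add" || operation == "multiply" || operation == "max" || operation == "min" then
    pvTree operation spells
  else 0  -- ValueError "Error: Unknown operation" (outside Pre_)

-- ===== PRECONDITION & SPEC =====
-- A raises ValueError ("Unknown operation") when spells is nonempty and operation is none of the four names;
-- Pre_ excludes exactly those inputs (on empty spells both return 0 before the operation is inspected).
def Pre_spell_reducer (spells : List Int) (operation : String) : Prop :=
  spells = [] ∨ operation = "add" ∨ operation = "multiply" ∨ operation = "max" ∨ operation = "min"
instance (spells : List Int) (operation : String) : Decidable (Pre_spell_reducer spells operation) := by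
  unfold Pre_spell_reducer; infer_instance
def pvWitness_spell_reducer : List Int × String := ([3, 1, 2], "max")

def Spec_spell_reducer (spells : List Int) (operation : String) (out : Int) : Prop := out = spell_reducer_alt spells operation
instance (spells : List Int) (operation : String) (out : Int) : Decidable (Spec_spell_reducer spells operation out) := by unfold Spec_spell_reducer; infer_instance

-- ===== CLAIM (what is proved, stated in full; the proofs are below) =====
def Claim_equal_spell_reducer : Prop := ∀ (spells : List Int) (operation : String), Dom_spell_reducer spells operation → Pre_spell_reducer spells operation → Spec_spell_reducer spells operation (spell_reducer spells operation)

-- ===== LEMMAS AND PROOFS =====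
theorem pvComb_assoc (op : String) (a b c : Int) :
    pvComb op (pvComb op a b) c = pvComb op a (pvComb op b c) := by
  unfold pvComb; split_ifs <;> first | ring | omega

theorem foldl_comb_shift (op : String) (l : List Int) (a b : Int) :
    l.foldl (pvComb op) (pvComb op a b) = pvComb op a (l.foldl (pvComb op) b) := by
  induction l generalizing b with
  | nil => simp
  | cons x xs ih => simp only [List.foldl, pvComb_assoc, ih]

theorem pvTree_eq_foldl (op : String) :
    ∀ (h : Int) (t : List Int), pvTree op (h :: t) = t.foldl (pvComb op) h := by
  have main : ∀ n (h : Int) (t : List Int), (h :: t).length ≤ n →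
      pvTree op (h :: t) = t.foldl (pvComb op) h := by
    intro n
    induction n with
    | zero => intro h t hl; simp at hl
    | succ n ih =>
      intro h t hl
      match t with
      | [] => simp [pvTree]
      | y :: rest =>
        rw [pvTree]
        set xs := h :: y :: rest with hxs
        have hlen : xs.length ≥ 2 := by simp [hxs]
        have hm1 : 1 ≤ xs.length / 2 := by omega
        have hm2 : xs.length / 2 < xs.length := by omega
        obtain ⟨l1, L, hL⟩ : ∃ l1 L, xs.take (xs.length / 2) = l1 :: L := by
          cases htk : xs.take (xs.length / 2) with
          | nil => exfalso; have := congrArg List.length htk; simp at this; omega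
          | cons a as => exact ⟨a, as, rfl⟩
        obtain ⟨r1, R, hR⟩ : ∃ r1 R, xs.drop (xs.length / 2) = r1 :: R := by
          cases hdr : xs.drop (xs.length / 2) with
          | nil => exfalso; have := congrArg List.length hdr; simp at this; omega
          | cons a as => exact ⟨a, as, rfl⟩
        have hLlen : (l1 :: L).length ≤ n := by
          have := congrArg List.length hL; simp at this ⊢
          simp [hxs] at hl this ⊢; omega
        have hRlen : (r1 :: R).length ≤ n := by
          have := congrArg List.length hR; simp at this ⊢
          simp [hxs] at hl this ⊢; omega
        rw [hL, hR, ih l1 L hLlen, ih r1 R hRlen]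
        have happ : xs = (l1 :: L) ++ (r1 :: R) := by
          rw [← hL, ← hR, List.take_append_drop]
        have hx : h = l1 ∧ y :: rest = L ++ r1 :: R := by
          have := happ; simp [hxs] at this; exact ⟨this.1, this.2⟩
        rw [hx.2, hx.1, List.foldl_append]
        simp only [List.foldl]
        exact (foldl_comb_shift op R _ r1).symm
  intro h t; exact main (h :: t).length h t le_rfl

theorem spell_reducer_spec : Claim_equal_spell_reducer := by
  intro spells operation _ hpre
  unfold Spec_spell_reducer spell_reducer spell_reducer_alt
  match spells with
  | [] => simp
  | h :: t =>
    have hne : ¬ (h :: t = ([] : List Int)) := by simp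
    simp only [if_neg hne]
    by_cases hadd : operation = "add"
    · subst hadd
      have hc : pvComb "add" = (· + ·) := by
        funext a b; simp [pvComb]
      simp [pvTree_eq_foldl, hc]
    · by_cases hmul : operation = "multiply"
      · subst hmul
        have hc : pvComb "multiply" = (· * ·) := by
          funext a b; simp [pvComb]
        simp [pvTree_eq_foldl, hc]
      · by_cases hmax : operation = "max"
        · subst hmax
          have hc : pvComb "max" = (max : Int → Int → Int) := by
            funext a b; simp [pvComb]; split_ifs <;> omega
          simp [pvTree_eq_foldl, hc]
        · by_cases hmin : operation = "min"
          · subst hmin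
            have hc : pvComb "min" = (min : Int → Int → Int) := by
              funext a b; simp [pvComb]; split_ifs <;> omega
            simp [pvTree_eq_foldl, hc]
          · rcases hpre with h0 | h1 | h2 | h3 | h4 <;> simp_all
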